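-- pv_equiv track=rewrite | github.com/nvol/tiqtaq | main.py | transform
-- ===== SOURCE A (Python) =====
-- def transform(turns, op):
--     return_int = False
--     if type(turns) is int:
--         turns = [turns]
--         return_int = True
--     for t in op:
--         if t == 'd':
--             turns = [(10-i-1)%8+1 if i!=0 else 0 for i in turns]
--         elif t in 'abc':
--             inc = (ord(t)-ord('a')+1)*2
--             turns = [(i+inc-1)%8+1 if i!=0 else 0 for i in turns]
--     if return_int:
--         turns = turns[0]
--     return turns
-- ===== SOURCE B (Python) =====
-- def transform(turns, op):
--     return_int = False
--     if type(turns) is int: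
--         turns = [turns]
--         return_int = True
--     # compose all ops into one affine map v -> (s*v + c - 1) % 8 + 1 on nonzero values
--     s, c, applied = 1, 0, False
--     for t in op:
--         if t == 'd':
--             s, c, applied = -s, 2 - c, True
--         elif t in 'abc':
--             c, applied = c + (ord(t) - ord('a') + 1) * 2, True
--     if applied:
--         turns = [0 if i == 0 else (s * i + c - 1) % 8 + 1 for i in turns]
--     if return_int:
--         turns = turns[0]
--     return turns
-- ===== Notes on version B (the rewrite author's own statement) =====
-- stated objective: faster
-- what changed: B composes the whole op string into a single affine map v -> (s*v+c-1)%8+1 (tracking sign s and offset c in one scan) and applies it to the list once, instead of rewriting the whole list for every op character.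
import Mathlib
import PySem

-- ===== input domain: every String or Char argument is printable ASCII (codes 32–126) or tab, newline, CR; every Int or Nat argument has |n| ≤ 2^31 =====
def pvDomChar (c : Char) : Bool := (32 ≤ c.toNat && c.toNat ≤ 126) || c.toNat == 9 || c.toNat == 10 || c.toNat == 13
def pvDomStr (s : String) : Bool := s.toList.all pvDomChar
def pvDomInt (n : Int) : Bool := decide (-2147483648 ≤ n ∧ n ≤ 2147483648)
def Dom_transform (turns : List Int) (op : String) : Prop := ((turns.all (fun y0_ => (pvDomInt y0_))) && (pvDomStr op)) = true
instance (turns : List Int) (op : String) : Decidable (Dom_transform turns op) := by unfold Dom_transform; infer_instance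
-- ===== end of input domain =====

-- B composes the whole op string into one affine map v ↦ (s·v+c−1) % 8 + 1 applied to the list once,
-- instead of rewriting the list for every op character (objective: faster, O(|op|·|turns|) → O(|op|+|turns|)).
-- Under the type convention 'turns' is a list, so Python A's 'type(turns) is int' branch never fires; both ports drop it.

-- ===== PORT A =====
def transform (turns : List Int) (op : String) : List Int :=
  op.toList.foldl
    (fun turns t =>
      if t = 'd' then
        turns.map (fun i => if i ≠ 0 then PySem.Int.mod (10 - i - 1) 8 + 1 else 0)
      else if t = 'a' ∨ t = 'b' ∨ t = 'c' then
        let inc : Int := ((t.toNat : Int) - ('a'.toNat : Int) + 1) * 2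
        turns.map (fun i => if i ≠ 0 then PySem.Int.mod (i + inc - 1) 8 + 1 else 0)
      else turns)
    turns

-- ===== PORT B =====
-- state (s, c, applied): the composed map is v ↦ (s·v + c − 1) % 8 + 1 on nonzero v, if applied
def bStep (st : Int × Int × Bool) (t : Char) : Int × Int × Bool :=
  if t = 'd' then (-st.1, 2 - st.2.1, true)
  else if t = 'a' ∨ t = 'b' ∨ t = 'c' then
    (st.1, st.2.1 + ((t.toNat : Int) - ('a'.toNat : Int) + 1) * 2, true)
  else st

def bApply (st : Int × Int × Bool) (turns : List Int) : List Int :=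
  if st.2.2 then
    turns.map (fun i => if i = 0 then 0 else PySem.Int.mod (st.1 * i + st.2.1 - 1) 8 + 1)
  else turns

def transform_alt (turns : List Int) (op : String) : List Int :=
  bApply (op.toList.foldl bStep (1, 0, false)) turns

-- ===== PRECONDITION & SPEC =====
def Spec_transform (turns : List Int) (op : String) (out : List Int) : Prop := out = transform_alt turns op
instance (turns : List Int) (op : String) (out : List Int) : Decidable (Spec_transform turns op out) := by unfold Spec_transform; infer_instance

-- ===== CLAIM (what is proved, stated in full; the proofs are below) =====
def Claim_equal_transform : Prop := ∀ (turns : List Int) (op : String), Dom_transform turns op → Spec_transform turns op (transform turns op)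

-- ===== LEMMAS AND PROOFS =====
-- A's loop body, named so the proofs can talk about it
def aStep (turns : List Int) (t : Char) : List Int :=
  if t = 'd' then
    turns.map (fun i => if i ≠ 0 then PySem.Int.mod (10 - i - 1) 8 + 1 else 0)
  else if t = 'a' ∨ t = 'b' ∨ t = 'c' then
    let inc : Int := ((t.toNat : Int) - ('a'.toNat : Int) + 1) * 2
    turns.map (fun i => if i ≠ 0 then PySem.Int.mod (i + inc - 1) 8 + 1 else 0)
  else turns

lemma transform_eq (turns : List Int) (op : String) :
    transform turns op = op.toList.foldl aStep turns := rfl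

lemma mod8_emod (x : Int) : PySem.Int.mod x 8 = x % 8 :=
  PySem.Int.mod_eq_emod_of_pos (by norm_num)

-- one A-step on an already-mapped list = the stepped affine map applied once
lemma stepA_from (s c : Int) (t : Char) (turns : List Int) :
    aStep (bApply (s, c, true) turns) t = bApply (bStep (s, c, true) t) turns := by
  unfold aStep bStep bApply
  by_cases hd : t = 'd'
  · simp only [hd, if_true, List.map_map]
    refine List.map_congr_left (fun i _ => ?_)
    simp only [Function.comp]
    by_cases hi : i = 0
    · simp [hi]
    · have h0 : 0 ≤ PySem.Int.mod (s * i + c - 1) 8 := by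
        rw [mod8_emod]; exact Int.emod_nonneg _ (by norm_num)
      have hne : PySem.Int.mod (s * i + c - 1) 8 + 1 ≠ 0 := by omega
      simp only [hi, if_false, hne, ne_eq, not_false_iff, if_true]
      have hm : -s * i = -(s * i) := by ring
      rw [mod8_emod, mod8_emod, mod8_emod, hm]
      generalize s * i = x
      omega
  · by_cases ha : t = 'a' ∨ t = 'b' ∨ t = 'c'
    · simp only [hd, ha, if_true, List.map_map]
      refine List.map_congr_left (fun i _ => ?_)
      simp only [Function.comp]
      by_cases hi : i = 0
      · simp [hi]
      · have h0 : 0 ≤ PySem.Int.mod (s * i + c - 1) 8 := by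
          rw [mod8_emod]; exact Int.emod_nonneg _ (by norm_num)
        have hne : PySem.Int.mod (s * i + c - 1) 8 + 1 ≠ 0 := by omega
        simp only [hi, if_false, hne, ne_eq, not_false_iff, if_true]
        rw [mod8_emod, mod8_emod, mod8_emod]
        generalize s * i = x
        generalize ((t.toNat : Int) - ('a'.toNat : Int) + 1) * 2 = inc
        omega
    · simp [hd, ha]

-- first applicable op activates the affine map correctly
lemma stepA_start (t : Char) (turns : List Int) :
    aStep turns t = bApply (bStep (1, 0, false) t) turns := by
  unfold aStep bStep bApply
  by_cases hd : t = 'd'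
  · simp only [hd, if_true]
    refine List.map_congr_left (fun i _ => ?_)
    by_cases hi : i = 0
    · simp [hi]
    · simp only [hi, ne_eq, not_false_iff, if_true, if_false]
      rw [mod8_emod, mod8_emod]
      have : -1 * i = -i := by ring
      rw [this]; omega
  · by_cases ha : t = 'a' ∨ t = 'b' ∨ t = 'c'
    · simp only [hd, ha, if_true]
      refine List.map_congr_left (fun i _ => ?_)
      by_cases hi : i = 0
      · simp [hi]
      · simp only [hi, ne_eq, not_false_iff, if_true, if_false, one_mul, zero_add]
    · simp [hd, ha]

lemma foldl_invariant (cs : List Char) (st : Int × Int × Bool)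
    (h : st.2.2 = false → st = (1, 0, false)) (turns : List Int) :
    cs.foldl aStep (bApply st turns) = bApply (cs.foldl bStep st) turns := by
  induction cs generalizing st with
  | nil => rfl
  | cons t cs ih =>
    have hstep : aStep (bApply st turns) t = bApply (bStep st t) turns := by
      obtain ⟨s, c, b⟩ := st
      cases b with
      | true => exact stepA_from s c t turns
      | false =>
        have := h rfl
        rw [this]
        have hb : bApply ((1 : Int), (0 : Int), false) turns = turns := rfl
        rw [hb]
        exact stepA_start t turns
    have hgood : (bStep st t).2.2 = false → bStep st t = (1, 0, false) := by
      intro hf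
      unfold bStep at hf ⊢
      by_cases hd : t = 'd'
      · simp [hd] at hf
      · by_cases ha : t = 'a' ∨ t = 'b' ∨ t = 'c'
        · simp [hd, ha] at hf
        · simp only [hd, ha, if_false] at hf ⊢
          exact h hf
    simp only [List.foldl_cons, hstep]
    exact ih (bStep st t) hgood

-- ===== VERDICT (by name: the statement is the Claim_ definition above) =====
theorem transform_spec : Claim_equal_transform := by
  intro turns op _
  unfold Spec_transform transform_alt
  rw [transform_eq]
  have h0 : turns = bApply ((1 : Int), (0 : Int), false) turns := rfl
  calc op.toList.foldl aStep turns
      = op.toList.foldl aStep (bApply ((1 : Int), (0 : Int), false) turns) := by rw [← h0]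
    _ = bApply (op.toList.foldl bStep ((1 : Int), (0 : Int), false)) turns :=
        foldl_invariant _ _ (fun _ => rfl) _
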